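-- pv_equiv track=rewrite | github.com/3340388133/behaviour1 | SuspiciousGazeDetection/run_final_v3.py | smooth_angles
-- ===== SOURCE A (Python) =====
-- def angle_diff(a1, a2):
--     diff = a2 - a1
--     while diff > 180:
--         diff -= 360
--     while diff < -180:
--         diff += 360
--     return diff
--
-- def smooth_angles(angles):
--     if len(angles) < 2:
--         return angles
--     smoothed = [angles[0]]
--     for i in range(1, len(angles)):
--         diff = angle_diff(smoothed[-1], angles[i])
--         smoothed.append(smoothed[-1] + diff)
--     return smoothed
-- ===== SOURCE B (Python) =====
-- def smooth_angles(angles):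
--     if len(angles) < 2:
--         return angles
--     out = [angles[0]]
--     prev = angles[0]
--     for a in angles[1:]:
--         d = a - prev
--         if d >= 0:
--             d = 180 - (180 - d) % 360
--         else:
--             d = (d + 180) % 360 - 180
--         prev += d
--         out.append(prev)
--     return out
-- ===== Notes on version B (the rewrite author's own statement) =====
-- stated objective: faster
-- what changed: The per-step while-loops that repeatedly add/subtract 360 are replaced by a single closed-form modular wrap per step ((d+180)%360-180, mirrored for nonnegative steps so the 180 boundary wraps toward the step's sign exactly as A's loops do).
import Mathlib
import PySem

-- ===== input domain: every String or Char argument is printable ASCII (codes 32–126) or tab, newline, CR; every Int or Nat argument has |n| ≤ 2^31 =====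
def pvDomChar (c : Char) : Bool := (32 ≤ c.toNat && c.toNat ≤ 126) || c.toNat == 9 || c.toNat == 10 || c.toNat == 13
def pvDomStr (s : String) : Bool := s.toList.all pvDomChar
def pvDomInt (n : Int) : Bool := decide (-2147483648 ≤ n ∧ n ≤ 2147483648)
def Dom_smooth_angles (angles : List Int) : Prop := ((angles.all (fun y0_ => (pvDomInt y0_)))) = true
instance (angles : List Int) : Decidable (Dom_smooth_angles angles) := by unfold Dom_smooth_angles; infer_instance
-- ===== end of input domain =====

-- B replaces A's repeated ±360 while-loops with one modular-arithmetic wrap per step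
-- (wrapping a step toward its own sign at the ±180 boundary, exactly as A's loops do);
-- objective: faster (O(1) per element instead of O(|difference|/360) loop iterations).

-- ===== PORT A =====
-- `while diff > 180: diff -= 360`
def pvWrapDown (d : Int) : Int :=
  if d > 180 then pvWrapDown (d - 360) else d
termination_by (d - 180).toNat
decreasing_by omega

-- `while diff < -180: diff += 360`
def pvWrapUp (d : Int) : Int :=
  if d < -180 then pvWrapUp (d + 360) else d
termination_by (-180 - d).toNat
decreasing_by omega

def angle_diff (a1 a2 : Int) : Int := pvWrapUp (pvWrapDown (a2 - a1))

def smooth_angles (angles : List Int) : List Int :=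
  if angles.length < 2 then angles
  else
    match angles with
    | [] => []  -- unreachable: length ≥ 2
    | a0 :: rest =>
      -- smoothed kept in reverse order; head = smoothed[-1]
      (rest.foldl (fun acc ai =>
        let diff := angle_diff (acc.headD 0) ai
        (acc.headD 0 + diff) :: acc) [a0]).reverse

-- ===== PORT B =====
def smooth_angles_alt (angles : List Int) : List Int :=
  if angles.length < 2 then angles
  else
    match angles with
    | [] => []  -- unreachable: length ≥ 2
    | a0 :: rest =>
      (rest.foldl (fun (st : List Int × Int) a =>
        let d := a - st.2
        let d := if d ≥ 0 then 180 - PySem.Int.mod (180 - d) 360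
                 else PySem.Int.mod (d + 180) 360 - 180
        (st.1 ++ [st.2 + d], st.2 + d)) ([a0], a0)).1

-- ===== PRECONDITION & SPEC =====
def Spec_smooth_angles (angles : List Int) (out : List Int) : Prop := out = smooth_angles_alt angles
instance (angles : List Int) (out : List Int) : Decidable (Spec_smooth_angles angles out) := by unfold Spec_smooth_angles; infer_instance

-- ===== CLAIM (what is proved, stated in full; the proofs are below) =====
def Claim_equal_smooth_angles : Prop := ∀ (angles : List Int), Dom_smooth_angles angles → Spec_smooth_angles angles (smooth_angles angles)

-- ===== LEMMAS AND PROOFS =====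

-- B's per-step wrap, as a function (for the lemmas only).
def pvWrapB (d : Int) : Int :=
  if d ≥ 0 then 180 - PySem.Int.mod (180 - d) 360
  else PySem.Int.mod (d + 180) 360 - 180

theorem pvWrapDown_eq (d : Int) (h : -180 < d) :
    pvWrapDown d = 180 - (180 - d) % 360 := by
  fun_induction pvWrapDown d with
  | case1 d hd ih =>
    rw [ih (by omega)]
    omega
  | case2 d hd =>
    omega

theorem pvWrapUp_eq (d : Int) (h : d < 180) :
    pvWrapUp d = (d + 180) % 360 - 180 := by
  fun_induction pvWrapUp d with
  | case1 d hd ih =>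
    rw [ih (by omega)]
    omega
  | case2 d hd =>
    omega

theorem angle_diff_eq (a1 a2 : Int) : angle_diff a1 a2 = pvWrapB (a2 - a1) := by
  unfold angle_diff pvWrapB
  rw [PySem.Int.mod_eq_emod_of_pos (show (0:Int) < 360 by norm_num),
     PySem.Int.mod_eq_emod_of_pos (show (0:Int) < 360 by norm_num)]
  set d := a2 - a1 with hd
  by_cases h0 : 0 ≤ d
  · -- d ≥ 0: pvWrapDown lands in (-180, 180], pvWrapUp is the identity there
    rw [pvWrapDown_eq d (by omega)]
    have h1 : 0 ≤ (180 - d) % 360 := Int.emod_nonneg _ (by norm_num)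
    have h2 : (180 - d) % 360 < 360 := Int.emod_lt_of_pos _ (by norm_num)
    rw [show pvWrapUp (180 - (180 - d) % 360) = 180 - (180 - d) % 360 by
      unfold pvWrapUp; rw [if_neg (by omega)]]
    simp [if_pos h0]
  · -- d < 0: pvWrapDown is the identity, pvWrapUp lands in [-180, 180)
    rw [show pvWrapDown d = d by unfold pvWrapDown; rw [if_neg (by omega)]]
    rw [pvWrapUp_eq d (by omega)]
    simp [if_neg h0]

-- Loop invariant: A's reversed-cons accumulator vs B's (list, last) pair.
theorem pv_loop_eq (rest : List Int) (prev : Int) (accRev : List Int) :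
    (rest.foldl (fun acc ai =>
        let diff := angle_diff (acc.headD 0) ai
        (acc.headD 0 + diff) :: acc) (prev :: accRev)).reverse =
    (rest.foldl (fun (st : List Int × Int) a =>
        let d := a - st.2
        let d := if d ≥ 0 then 180 - PySem.Int.mod (180 - d) 360
                 else PySem.Int.mod (d + 180) 360 - 180
        (st.1 ++ [st.2 + d], st.2 + d)) ((prev :: accRev).reverse, prev)).1 := by
  induction rest generalizing prev accRev with
  | nil => simp
  | cons a rest ih =>
    simp only [List.foldl_cons, List.headD_cons]
    rw [angle_diff_eq prev a]
    unfold pvWrapB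
    rw [show (prev :: accRev).reverse ++
          [prev + (if a - prev ≥ 0 then 180 - PySem.Int.mod (180 - (a - prev)) 360
                   else PySem.Int.mod (a - prev + 180) 360 - 180)] =
        ((prev + (if a - prev ≥ 0 then 180 - PySem.Int.mod (180 - (a - prev)) 360
                  else PySem.Int.mod (a - prev + 180) 360 - 180)) :: prev :: accRev).reverse
      from by simp]
    exact ih _ (prev :: accRev)

-- ===== VERDICT (by name: the statement is the Claim_ definition above) =====
theorem smooth_angles_spec : Claim_equal_smooth_angles := by
  intro angles _
  unfold Spec_smooth_angles smooth_angles smooth_angles_alt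
  by_cases h : angles.length < 2
  · simp [h]
  · rw [if_neg h, if_neg h]
    match angles with
    | [] => simp at h
    | a0 :: rest =>
      have := pv_loop_eq rest a0 []
      simpa using this
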